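-- pv_equiv track=rewrite | github.com/bgardner8008/calls-webrtc-debug | extract_conflict_packets.py | get_role_attr
-- ===== SOURCE A (Python) =====
-- def get_role_attr(udp_payload):
--     """Extract role attribute from UDP payload hex (0x8029=CONTROLLED, 0x802a=CONTROLLING)"""
--     # Parse hex string like "00:01:00:50:21:12:a4:42:..."
--     hex_bytes = bytes.fromhex(udp_payload.replace(':', ''))
--
--     # STUN header is 20 bytes: type(2) + length(2) + cookie(4) + txid(12)
--     # Attributes start at byte 20
--     offset = 20
--
--     while offset < len(hex_bytes):
--         # Each attribute: type(2) + length(2) + value(length) + padding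
--         if offset + 4 > len(hex_bytes):
--             break
--
--         attr_type = (hex_bytes[offset] << 8) | hex_bytes[offset + 1]
--         attr_len = (hex_bytes[offset + 2] << 8) | hex_bytes[offset + 3]
--
--         if attr_type == 0x8029:  # ICE-CONTROLLED
--             # Extract tie-breaker (8 bytes)
--             if offset + 4 + 8 <= len(hex_bytes):
--                 tie_breaker = hex_bytes[offset + 4:offset + 4 + 8].hex(':')
--                 return f'CONTROLLED (tie: {tie_breaker})'
--         elif attr_type == 0x802a:  # ICE-CONTROLLING
--             # Extract tie-breaker (8 bytes)
--             if offset + 4 + 8 <= len(hex_bytes):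
--                 tie_breaker = hex_bytes[offset + 4:offset + 4 + 8].hex(':')
--                 return f'CONTROLLING (tie: {tie_breaker})'
--
--         # Move to next attribute (4-byte aligned)
--         attr_len_padded = (attr_len + 3) & ~3
--         offset += 4 + attr_len_padded
--
--     return 'NO_ROLE'
-- ===== SOURCE B (Python) =====
-- def get_role_attr(udp_payload):
--     """Extract role attribute from UDP payload hex (0x8029=CONTROLLED, 0x802a=CONTROLLING)"""
--     data = bytes.fromhex(udp_payload.replace(':', ''))
--     n = len(data)
--     # Pass 1: walk the attribute chain, recording (type, tie-breaker available?, tie-breaker hex)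
--     attrs = []
--     offset = 20
--     while offset < n:
--         if offset + 4 > n:
--             break
--         attr_type = (data[offset] << 8) | data[offset + 1]
--         attr_len = (data[offset + 2] << 8) | data[offset + 3]
--         attrs.append((attr_type, offset + 12 <= n, data[offset + 4:offset + 12].hex(':')))
--         offset += 4 + ((attr_len + 3) & ~3)
--     # Pass 2: first role attribute whose tie-breaker is fully present wins
--     for attr_type, ok, tb in attrs:
--         if attr_type == 0x8029 and ok:
--             return f'CONTROLLED (tie: {tb})'
--         if attr_type == 0x802a and ok:
--             return f'CONTROLLING (tie: {tb})'
--     return 'NO_ROLE'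
-- ===== Notes on version B (the rewrite author's own statement) =====
-- stated objective: alternative
-- what changed: A decides and returns inside the single attribute walk; B splits it into two passes: one pass records every attribute as (type, tie-breaker-available, tie-breaker-hex), a second pass picks the first complete role attribute.
import Mathlib
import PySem

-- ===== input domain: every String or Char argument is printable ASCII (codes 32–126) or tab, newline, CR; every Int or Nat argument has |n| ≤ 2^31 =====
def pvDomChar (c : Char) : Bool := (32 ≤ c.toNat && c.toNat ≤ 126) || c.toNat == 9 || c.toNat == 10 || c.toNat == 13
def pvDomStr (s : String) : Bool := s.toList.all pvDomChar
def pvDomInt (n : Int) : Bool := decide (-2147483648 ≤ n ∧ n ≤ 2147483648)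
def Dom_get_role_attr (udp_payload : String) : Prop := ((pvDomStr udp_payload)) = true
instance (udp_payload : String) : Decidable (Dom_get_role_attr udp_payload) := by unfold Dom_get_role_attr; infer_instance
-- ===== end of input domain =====

-- B restructures A's single decide-inside-the-walk loop into two passes (collect all attributes, then pick the first complete role attribute); return values are identical on all valid hex inputs.

-- shared helpers: hex decoding of the payload (bytes.fromhex after removing ':')
-- and bytes.hex(':') formatting, used verbatim by both ports
def hexVal? (c : Char) : Option Nat :=
  if '0' ≤ c ∧ c ≤ '9' then some (c.toNat - 48)
  else if 'a' ≤ c ∧ c ≤ 'f' then some (c.toNat - 87)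
  else if 'A' ≤ c ∧ c ≤ 'F' then some (c.toNat - 55)
  else none

-- ASCII whitespace, skipped by bytes.fromhex between byte pairs
def isWS (c : Char) : Bool :=
  c == ' ' || c == '\t' || c == '\n' || c == '\r' || c.toNat == 11 || c.toNat == 12

-- bytes.fromhex: skip whitespace, then two adjacent hex digits per byte; exact on Pre_
def toBytes : List Char → List Nat
  | [] => []
  | c :: rest =>
    if isWS c then toBytes rest
    else match rest with
      | d :: rest' => (16 * (hexVal? c).getD 0 + (hexVal? d).getD 0) :: toBytes rest'
      | [] => []

def bytesOfPayload (s : String) : List Nat :=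
  toBytes (s.toList.filter (fun c => c ≠ ':'))

def hexDigitChar (n : Nat) : Char :=
  if n < 10 then Char.ofNat (48 + n) else Char.ofNat (87 + n)

-- bytes.hex(':') : each byte as two lowercase hex digits, ':'-joined
def tieHex (bs : List Nat) : String :=
  String.intercalate ":" (bs.map (fun b => String.ofList [hexDigitChar (b / 16), hexDigitChar (b % 16)]))

-- ===== PORT A =====
-- A's while loop; (attr_len+3) & ~3 = (l+3)/4*4 on naturals; << 8 | = 256*hi+lo on bytes
def loopA (bytes : List Nat) (offset : Nat) : String :=
  if offset < bytes.length then
    if bytes.length < offset + 4 then "NO_ROLE"  -- break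
    else
      let t := 256 * bytes.getD offset 0 + bytes.getD (offset + 1) 0
      let l := 256 * bytes.getD (offset + 2) 0 + bytes.getD (offset + 3) 0
      if t = 0x8029 then
        if offset + 12 ≤ bytes.length then
          "CONTROLLED (tie: " ++ tieHex ((bytes.drop (offset + 4)).take 8) ++ ")"
        else loopA bytes (offset + 4 + (l + 3) / 4 * 4)
      else if t = 0x802a then
        if offset + 12 ≤ bytes.length then
          "CONTROLLING (tie: " ++ tieHex ((bytes.drop (offset + 4)).take 8) ++ ")"
        else loopA bytes (offset + 4 + (l + 3) / 4 * 4)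
      else loopA bytes (offset + 4 + (l + 3) / 4 * 4)
  else "NO_ROLE"
termination_by bytes.length - offset
decreasing_by all_goals omega

def get_role_attr (udp_payload : String) : String :=
  loopA (bytesOfPayload udp_payload) 20

-- ===== PORT B =====
-- pass 1: record every attribute as (type, tie-breaker available?, tie-breaker hex)
def collectB (bytes : List Nat) (offset : Nat) : List (Nat × Bool × String) :=
  if offset < bytes.length then
    if bytes.length < offset + 4 then []  -- break
    else
      let t := 256 * bytes.getD offset 0 + bytes.getD (offset + 1) 0
      let l := 256 * bytes.getD (offset + 2) 0 + bytes.getD (offset + 3) 0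
      (t, decide (offset + 12 ≤ bytes.length), tieHex ((bytes.drop (offset + 4)).take 8))
        :: collectB bytes (offset + 4 + (l + 3) / 4 * 4)
  else []
termination_by bytes.length - offset
decreasing_by all_goals omega

-- pass 2: first complete role attribute wins
def findRoleB : List (Nat × Bool × String) → String
  | [] => "NO_ROLE"
  | (t, ok, tb) :: rest =>
    if t = 0x8029 ∧ ok = true then "CONTROLLED (tie: " ++ tb ++ ")"
    else if t = 0x802a ∧ ok = true then "CONTROLLING (tie: " ++ tb ++ ")"
    else findRoleB rest

def get_role_attr_alt (udp_payload : String) : String :=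
  findRoleB (collectB (bytesOfPayload udp_payload) 20)

-- ===== PRECONDITION & SPEC =====
-- valid bytes.fromhex digest: whitespace between byte pairs, each byte two adjacent hex digits
def validHex : List Char → Bool
  | [] => true
  | c :: rest =>
    if isWS c then validHex rest
    else match rest with
      | d :: rest' => (hexVal? c).isSome && (hexVal? d).isSome && validHex rest'
      | [] => false

-- Pre_ excludes exactly the inputs where bytes.fromhex of the colon-stripped payload raises
-- ValueError (a character that is neither hex digit, colon nor whitespace; a lone hex digit;
-- whitespace splitting a byte's two digits); both A and B raise that ValueError there.
def Pre_get_role_attr (udp_payload : String) : Prop :=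
  validHex (udp_payload.toList.filter (fun c => c ≠ ':')) = true
instance (udp_payload : String) : Decidable (Pre_get_role_attr udp_payload) := by
  unfold Pre_get_role_attr; infer_instance

def pvWitness_get_role_attr : String := "00:01"

def Spec_get_role_attr (udp_payload : String) (out : String) : Prop := out = get_role_attr_alt udp_payload
instance (udp_payload : String) (out : String) : Decidable (Spec_get_role_attr udp_payload out) := by unfold Spec_get_role_attr; infer_instance

-- ===== CLAIM (what is proved, stated in full; the proofs are below) =====
def Claim_equal_get_role_attr : Prop := ∀ (udp_payload : String), Dom_get_role_attr udp_payload → Pre_get_role_attr udp_payload → Spec_get_role_attr udp_payload (get_role_attr udp_payload)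

-- ===== LEMMAS AND PROOFS =====

-- the walk/decide loop of A equals B's collect-then-pick on every byte list and offset
theorem loopA_eq_findRole_collect (bytes : List Nat) (offset : Nat) :
    loopA bytes offset = findRoleB (collectB bytes offset) := by
  fun_induction loopA bytes offset with
  | _ =>
    first
    -- loop not entered (offset ≥ len)
    | (rw [collectB, if_neg (by omega)]; simp [findRoleB])
    -- break (offset + 4 > len)
    | (rw [collectB, if_pos (by omega), if_pos (by omega)]; simp [findRoleB])
    -- terminal CONTROLLED
    | (rw [collectB, if_pos (by omega), if_neg (by omega), findRoleB,
           if_pos ⟨by omega, by simp only [decide_eq_true_eq]; omega⟩])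
    -- terminal CONTROLLING
    | (rw [collectB, if_pos (by omega), if_neg (by omega), findRoleB,
           if_neg (by rintro ⟨h1, -⟩; omega),
           if_pos ⟨by omega, by simp only [decide_eq_true_eq]; omega⟩])
    -- continue to the next attribute
    | (rw [collectB, if_pos (by omega), if_neg (by omega), findRoleB,
           if_neg (by rintro ⟨h1, h2⟩; simp only [decide_eq_true_eq] at h2; omega),
           if_neg (by rintro ⟨h1, h2⟩; simp only [decide_eq_true_eq] at h2; omega)]
       assumption)

-- ===== VERDICT (by name: the statement is the Claim_ definition above) =====
theorem get_role_attr_spec : Claim_equal_get_role_attr := by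
  intro s _ _
  unfold Spec_get_role_attr get_role_attr get_role_attr_alt
  exact loopA_eq_findRole_collect _ _
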